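-- pv_equiv track=rewrite | github.com/mdsingh007/kushu | Edabit/highest_index/remove_word.py | remove_letters
-- ===== SOURCE A (Python) =====
-- def remove_letters(scrambled, word):
--     letters = []
--     letters2 = []
--     for elem in scrambled:
--         if elem not in letters and elem in word:
--             letters.append(elem)
--         else:
--             letters2.append(elem)
--     return letters2
-- ===== SOURCE B (Python) =====
-- def remove_letters(scrambled, word):
--     result = list(scrambled)
--     for letter in dict.fromkeys(word):
--         if letter in result:
--             result.remove(letter)
--     return result
-- ===== Notes on version B (the rewrite author's own statement) =====
-- stated objective: alternative
-- what changed: Instead of A's single pass over scrambled with a seen-list and two accumulators, B copies scrambled and loops over the distinct letters of word (dict.fromkeys), removing the first occurrence of each present letter with list.remove.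
import Mathlib
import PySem

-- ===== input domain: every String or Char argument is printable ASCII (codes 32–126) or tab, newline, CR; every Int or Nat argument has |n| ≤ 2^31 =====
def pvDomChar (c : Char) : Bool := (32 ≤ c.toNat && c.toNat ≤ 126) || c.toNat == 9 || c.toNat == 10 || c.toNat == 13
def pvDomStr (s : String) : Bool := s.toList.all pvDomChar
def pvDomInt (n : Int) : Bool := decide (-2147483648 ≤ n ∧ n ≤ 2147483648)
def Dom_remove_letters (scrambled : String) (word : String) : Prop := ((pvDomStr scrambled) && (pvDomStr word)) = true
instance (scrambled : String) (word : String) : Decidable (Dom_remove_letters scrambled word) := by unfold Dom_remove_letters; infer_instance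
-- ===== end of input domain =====

-- B replaces A's single seen-list pass over scrambled by a loop over the distinct letters of
-- word that removes each present letter's first occurrence from a copy (objective: alternative).


-- ===== PORT A =====
-- 'elem in word' on a one-character string elem is exactly membership among word's
-- characters (taken as one-character strings), which is how both ports model it.
def remove_letters (scrambled : String) (word : String) : List String :=
  let w := word.toList.map (fun c => String.mk [c])
  (scrambled.toList.foldl
    (fun (st : List String × List String) c =>
      let elem := String.mk [c]
      if elem ∉ st.1 ∧ elem ∈ w then (st.1 ++ [elem], st.2) else (st.1, st.2 ++ [elem]))
    ([], [])).2

-- ===== PORT B =====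
-- dict.fromkeys(word) iterates word's distinct letters in first-occurrence order
-- (PySem.List.dedup); the guarded result.remove(letter) is List.erase (first occurrence).
def remove_letters_alt (scrambled : String) (word : String) : List String :=
  (PySem.List.dedup (word.toList.map (fun c => String.mk [c]))).foldl
    (fun r letter => if letter ∈ r then r.erase letter else r)
    (scrambled.toList.map (fun c => String.mk [c]))

-- ===== PRECONDITION & SPEC =====
def Spec_remove_letters (scrambled : String) (word : String) (out : List String) : Prop := out = remove_letters_alt scrambled word
instance (scrambled : String) (word : String) (out : List String) : Decidable (Spec_remove_letters scrambled word out) := by unfold Spec_remove_letters; infer_instance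

-- ===== CLAIM (what is proved, stated in full; the proofs are below) =====
def Claim_equal_remove_letters : Prop := ∀ (scrambled : String) (word : String), Dom_remove_letters scrambled word → Spec_remove_letters scrambled word (remove_letters scrambled word)

-- ===== LEMMAS AND PROOFS =====

-- A's pass, as a plain recursion: keep elem unless it is a not-yet-seen letter of W.
def apass (W : List String) : List String → List String → List String
  | _, [] => []
  | seen, x :: xs =>
    if x ∉ seen ∧ x ∈ W then apass W (seen ++ [x]) xs else x :: apass W seen xs

theorem apass_foldl (W : List String) :
    ∀ (xs : List String) (seen acc : List String),
      (xs.foldl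
        (fun (st : List String × List String) x =>
          if x ∉ st.1 ∧ x ∈ W then (st.1 ++ [x], st.2) else (st.1, st.2 ++ [x]))
        (seen, acc)).2 = acc ++ apass W seen xs := by
  intro xs
  induction xs with
  | nil => intro seen acc; simp [apass]
  | cons x xs ih =>
    intro seen acc
    by_cases h : x ∉ seen ∧ x ∈ W
    · simp [apass, h, ih]
    · simp [apass, h, ih]

theorem foldl_erase_nil (L : List String) :
    L.foldl (fun r l => r.erase l) [] = [] := by
  induction L with
  | nil => rfl
  | cons l L ih => simpa using ih

theorem foldl_erase_cons_not_mem (L : List String) :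
    ∀ (c : String) (cs : List String), c ∉ L →
      L.foldl (fun r l => r.erase l) (c :: cs) = c :: L.foldl (fun r l => r.erase l) cs := by
  induction L with
  | nil => intro c cs _; rfl
  | cons l L ih =>
    intro c cs h
    have hlc : l ≠ c := fun e => h (by simp [e])
    have : (c :: cs).erase l = c :: cs.erase l :=
      List.erase_cons_tail (by simpa using (Ne.symm hlc))
    simp only [List.foldl_cons, this]
    exact ih c (cs.erase l) (fun hm => h (List.mem_cons_of_mem _ hm))

theorem foldl_erase_cons_mem (L : List String) :
    ∀ (c : String) (cs : List String), c ∈ L → L.Nodup →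
      L.foldl (fun r l => r.erase l) (c :: cs) =
        (L.erase c).foldl (fun r l => r.erase l) cs := by
  induction L with
  | nil => intro c cs h; exact absurd h (by simp)
  | cons l L ih =>
    intro c cs hc hnd
    by_cases hlc : l = c
    · subst hlc
      simp only [List.foldl_cons, List.erase_cons_head]
    · have hcL : c ∈ L := by
        rcases List.mem_cons.mp hc with h | h
        · exact absurd h.symm hlc
        · exact h
      have hndL : L.Nodup := hnd.of_cons
      have h1 : (c :: cs).erase l = c :: cs.erase l :=
        List.erase_cons_tail (by simpa using (Ne.symm hlc))
      have h2 : (l :: L).erase c = l :: L.erase c :=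
        List.erase_cons_tail (by simpa using hlc)
      simp only [List.foldl_cons, h1, h2]
      exact ih c (cs.erase l) hcL hndL

-- The remaining-letters view of A's seen-list.
def rem (W seen : List String) : List String :=
  (PySem.Set.ofList W).filter (fun l => decide (l ∉ seen))

theorem mem_rem (W seen : List String) (x : String) :
    x ∈ rem W seen ↔ x ∈ W ∧ x ∉ seen := by
  simp [rem, List.mem_filter, PySem.Set.mem_ofList]

theorem nodup_rem (W seen : List String) : (rem W seen).Nodup :=
  (PySem.Set.nodup_ofList W).filter _

theorem rem_snoc (W seen : List String) (x : String) :
    (rem W seen).erase x = rem W (seen ++ [x]) := by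
  rw [(nodup_rem W seen).erase_eq_filter x]
  simp only [rem, List.filter_filter]
  refine List.filter_congr ?_
  intro y _
  by_cases h : y = x <;> simp [h]

theorem bridge (W : List String) :
    ∀ (xs seen : List String),
      (rem W seen).foldl (fun r l => r.erase l) xs = apass W seen xs := by
  intro xs
  induction xs with
  | nil => intro seen; simp [apass, foldl_erase_nil]
  | cons x xs ih =>
    intro seen
    by_cases h : x ∉ seen ∧ x ∈ W
    · have hx : x ∈ rem W seen := (mem_rem W seen x).mpr ⟨h.2, h.1⟩
      rw [foldl_erase_cons_mem _ _ _ hx (nodup_rem W seen), rem_snoc, ih]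
      simp [apass, h]
    · have hx : x ∉ rem W seen := fun hm => by
        rcases (mem_rem W seen x).mp hm with ⟨hw, hs⟩
        exact h ⟨hs, hw⟩
      rw [foldl_erase_cons_not_mem _ _ _ hx, ih]
      simp [apass, h]

theorem guard_fold_eq_erase_fold (L : List String) :
    ∀ (xs : List String),
      L.foldl (fun r letter => if letter ∈ r then r.erase letter else r) xs =
        L.foldl (fun r l => r.erase l) xs := by
  induction L with
  | nil => intro xs; rfl
  | cons l L ih =>
    intro xs
    simp only [List.foldl_cons]
    by_cases h : l ∈ xs
    · simp [h, ih]
    · simp [h, ih, List.erase_of_not_mem h]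

theorem rem_nil (W : List String) : rem W [] = PySem.Set.ofList W := by
  simp [rem]

-- ===== VERDICT (by name: the statement is the Claim_ definition above) =====
theorem remove_letters_spec : Claim_equal_remove_letters := by
  intro scrambled word _
  unfold Spec_remove_letters remove_letters remove_letters_alt
  rw [PySem.List.dedup_eq_ofList, guard_fold_eq_erase_fold, ← rem_nil, bridge]
  have h := apass_foldl (word.toList.map (fun c => String.mk [c]))
      (scrambled.toList.map (fun c => String.mk [c])) [] []
  rw [List.foldl_map] at h
  simpa using h
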